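-- pv_equiv track=rewrite | github.com/AbductiveLearning/Meta_Abd | python/data.py | myprod_sum
-- ===== SOURCE A (Python) =====
-- def myprod_sum(x):
--     "monadic, ((a*b)+c)*d..."
--     i = 1
--     re = x[0]
--     while i < len(x):
--         if i % 2 == 1:
--             re = re * x[i]
--         else:
--             re = re + x[i]
--         i = i + 1
--     return re
-- ===== SOURCE B (Python) =====
-- def myprod_sum(x):
--     "monadic, ((a*b)+c)*d..."
--     re = x[0]
--     rest = x[1:]
--     n = len(rest)
--     for j in range(0, n - 1, 2):
--         re = re * rest[j] + rest[j + 1]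
--     if n % 2 == 1:
--         re = re * rest[n - 1]
--     return re
-- ===== Notes on version B (the rewrite author's own statement) =====
-- stated objective: alternative
-- what changed: Replaced the per-element parity branch (i % 2) with a stride-2 loop over (multiplier, addend) pairs of the tail, applying re = re*a + b per pair and one trailing multiply when the tail has odd length.
import Mathlib
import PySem

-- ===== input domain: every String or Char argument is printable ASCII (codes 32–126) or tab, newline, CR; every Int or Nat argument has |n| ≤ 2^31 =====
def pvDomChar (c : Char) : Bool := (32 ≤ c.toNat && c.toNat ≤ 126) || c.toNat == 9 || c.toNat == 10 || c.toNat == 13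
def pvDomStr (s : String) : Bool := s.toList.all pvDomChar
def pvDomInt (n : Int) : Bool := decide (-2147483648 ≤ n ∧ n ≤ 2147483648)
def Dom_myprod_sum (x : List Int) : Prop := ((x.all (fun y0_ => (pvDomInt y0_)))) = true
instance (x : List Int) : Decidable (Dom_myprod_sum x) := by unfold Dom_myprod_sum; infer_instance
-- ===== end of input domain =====

-- B replaces A's per-element parity branch with a stride-2 pair loop over the tail; alternative decomposition, same cost.
-- ===== PORT A =====
-- while loop of A: index i, accumulator re; x[i] is total here (guarded by i < len x)
def myprodLoopA (x : List Int) (i : Nat) (re : Int) : Int :=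
  if h : i < x.length then
    myprodLoopA x (i + 1) (if i % 2 == 1 then re * x[i] else re + x[i])
  else re
termination_by x.length - i

def myprod_sum (x : List Int) : Int :=
  -- x[0]: raises on []; excluded by Pre_, headI used as a total stand-in
  myprodLoopA x 1 x.headI

-- ===== PORT B =====
-- stride-2 pair loop over the tail: re = re*a + b per pair, trailing multiply if one element left
def myprodPairsB (re : Int) : List Int → Int
  | [] => re
  | [a] => re * a
  | a :: b :: rest => myprodPairsB (re * a + b) rest

def myprod_sum_alt (x : List Int) : Int :=
  match x with
  | [] => 0  -- x[0] raises in Python; excluded by Pre_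
  | h :: t => myprodPairsB h t

-- ===== PRECONDITION & SPEC =====
-- A raises IndexError (x[0]) on the empty list; Pre_ excludes exactly that.
def Pre_myprod_sum (x : List Int) : Prop := x ≠ []
instance (x : List Int) : Decidable (Pre_myprod_sum x) := by unfold Pre_myprod_sum; infer_instance
def pvWitness_myprod_sum : List Int := [2, 3, 4]

def Spec_myprod_sum (x : List Int) (out : Int) : Prop := out = myprod_sum_alt x
instance (x : List Int) (out : Int) : Decidable (Spec_myprod_sum x out) := by unfold Spec_myprod_sum; infer_instance

-- ===== CLAIM (what is proved, stated in full; the proofs are below) =====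
def Claim_equal_myprod_sum : Prop := ∀ (x : List Int), Dom_myprod_sum x → Pre_myprod_sum x → Spec_myprod_sum x (myprod_sum x)

-- ===== LEMMAS AND PROOFS =====
-- A's loop from an odd index i equals B's pair loop over the remaining suffix x.drop i.
theorem loopA_eq_pairsB (x : List Int) (i : Nat) (re : Int) (hodd : i % 2 = 1) :
    myprodLoopA x i re = myprodPairsB re (x.drop i) := by
  by_cases h1 : i < x.length
  · by_cases h2 : i + 1 < x.length
    · -- two more elements: one multiply step then one add step
      rw [myprodLoopA, dif_pos h1, myprodLoopA, dif_pos h2]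
      have hodd1 : (i + 1) % 2 = 0 := by omega
      have hodd2 : (i + 2) % 2 = 1 := by omega
      rw [hodd, hodd1]
      norm_num
      rw [show i + 1 + 1 = i + 2 from rfl,
          loopA_eq_pairsB x (i + 2) (re * x[i] + x[i+1]) hodd2]
      have hd : x.drop i = x[i] :: x[i+1] :: x.drop (i + 2) := by
        rw [List.drop_eq_getElem_cons h1, List.drop_eq_getElem_cons h2]
      rw [hd, myprodPairsB]
    · -- exactly one element left: final multiply
      rw [myprodLoopA, dif_pos h1, myprodLoopA, dif_neg (by omega)]
      have hd : x.drop i = [x[i]] := by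
        rw [List.drop_eq_getElem_cons h1]
        simp [List.drop_eq_nil_iff.mpr (by omega : x.length ≤ i + 1)]
      rw [hd, myprodPairsB, show (i % 2 == 1) = true by simp [hodd]]
      simp
  · rw [myprodLoopA, dif_neg h1, List.drop_eq_nil_iff.mpr (by omega), myprodPairsB]
termination_by x.length - i

-- ===== VERDICT (by name: the statement is the Claim_ definition above) =====
theorem myprod_sum_spec : Claim_equal_myprod_sum := by
  intro x _ hpre
  unfold Spec_myprod_sum myprod_sum myprod_sum_alt
  match x with
  | [] => exact absurd rfl hpre
  | h :: t =>
    rw [loopA_eq_pairsB (h :: t) 1 (h :: t).headI (by norm_num)]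
    simp [List.headI]
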